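-- pv_equiv track=rewrite | github.com/JuanCB110/Pythonn | Automatas/AEnteros.py | validar_numero_entero
-- ===== SOURCE A (Python) =====
-- def validar_numero_entero(cadena: str) -> bool:
--     # Tabla de estados
--     tabla_estados = [
--         #   -   d   otro
--         [1, 2, 3],  # estado 0 (inicial)
--         [3, 2, 3],  # estado 1 (reconoce '-')
--         [3, 2, 3],  # estado 2 (reconoce dígitos)
--         [3, 3, 3]   # estado 3 (estado de error)
--     ]
--
--     estado = 0
--
--     for caracter in cadena:
--         if caracter == '-':
--             estado = tabla_estados[estado][0]
--         elif caracter.isdigit():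
--             estado = tabla_estados[estado][1]
--         else:
--             estado = tabla_estados[estado][2]
--
--     # El estado de aceptación es el 2 (reconoce números válidos)
--     return estado == 2
-- ===== SOURCE B (Python) =====
-- def validar_numero_entero(cadena: str) -> bool:
--     rest = cadena[1:] if cadena.startswith('-') else cadena
--     return len(rest) > 0 and all(c.isdigit() for c in rest)
-- ===== Notes on version B (the rewrite author's own statement) =====
-- stated objective: simpler
-- what changed: Replaced the explicit DFA state-transition table with a one-time optional-sign prefix decision followed by a single all(.isdigit()) predicate over the remainder.
import Mathlib
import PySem

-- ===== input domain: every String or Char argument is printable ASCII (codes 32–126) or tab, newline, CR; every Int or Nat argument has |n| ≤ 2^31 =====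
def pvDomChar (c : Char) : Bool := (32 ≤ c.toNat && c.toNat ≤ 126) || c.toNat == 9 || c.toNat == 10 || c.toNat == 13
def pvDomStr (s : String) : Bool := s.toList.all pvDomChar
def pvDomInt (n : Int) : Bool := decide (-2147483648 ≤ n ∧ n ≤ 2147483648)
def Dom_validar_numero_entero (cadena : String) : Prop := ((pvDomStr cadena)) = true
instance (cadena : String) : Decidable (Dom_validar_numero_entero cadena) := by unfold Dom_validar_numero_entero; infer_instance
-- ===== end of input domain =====

-- B replaces A's DFA transition table by an optional-sign prefix decision plus a single
-- all-digits predicate (objective: simpler).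

-- ===== PORT A =====
-- per-character DFA step, reading the transition table exactly as A does
def pvTablaEstados : List (List Nat) := [[1, 2, 3], [3, 2, 3], [3, 2, 3], [3, 3, 3]]

def pvStepA (estado : Nat) (caracter : Char) : Nat :=
  if caracter == '-' then (pvTablaEstados.getD estado []).getD 0 0
  else if PySem.Chars.isdigit caracter then (pvTablaEstados.getD estado []).getD 1 0
  else (pvTablaEstados.getD estado []).getD 2 0

def validar_numero_entero (cadena : String) : Bool :=
  (cadena.toList.foldl pvStepA 0) == 2

-- ===== PORT B =====
def validar_numero_entero_alt (cadena : String) : Bool :=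
  let rest := if PySem.Str.startswith cadena "-" then PySem.Str.slice cadena (some 1) none
              else cadena
  decide (0 < PySem.Str.len rest) && rest.toList.all PySem.Chars.isdigit

-- ===== PRECONDITION & SPEC =====
def Spec_validar_numero_entero (cadena : String) (out : Bool) : Prop := out = validar_numero_entero_alt cadena
instance (cadena : String) (out : Bool) : Decidable (Spec_validar_numero_entero cadena out) := by unfold Spec_validar_numero_entero; infer_instance

-- ===== CLAIM (what is proved, stated in full; the proofs are below) =====
def Claim_equal_validar_numero_entero : Prop := ∀ (cadena : String), Dom_validar_numero_entero cadena → Spec_validar_numero_entero cadena (validar_numero_entero cadena)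

-- ===== LEMMAS AND PROOFS =====
theorem pvFold_from3 (l : List Char) : l.foldl pvStepA 3 = 3 := by
  induction l with
  | nil => rfl
  | cons c cs ih =>
      simp only [List.foldl_cons]
      have h : pvStepA 3 c = 3 := by
        unfold pvStepA pvTablaEstados
        split_ifs <;> rfl
      rw [h, ih]

theorem pvFold_from2 (l : List Char) :
    (l.foldl pvStepA 2 == 2) = l.all PySem.Chars.isdigit := by
  induction l with
  | nil => rfl
  | cons c cs ih =>
      simp only [List.foldl_cons, List.all_cons]
      by_cases hd : PySem.Chars.isdigit c = true
      · have hm : c ≠ '-' := by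
          intro h; subst h; exact absurd hd (by decide)
        have h : pvStepA 2 c = 2 := by
          unfold pvStepA pvTablaEstados
          rw [if_neg (by simpa using hm), if_pos hd]
          rfl
        rw [h, ih, hd, Bool.true_and]
      · have h : pvStepA 2 c = 3 := by
          unfold pvStepA pvTablaEstados
          split_ifs with h1
          · rfl
          · rfl
        rw [h, pvFold_from3]
        simp [hd]

theorem pvFold_from1 (l : List Char) :
    (l.foldl pvStepA 1 == 2) = (!l.isEmpty && l.all PySem.Chars.isdigit) := by
  induction l with
  | nil => rfl
  | cons c cs ih =>
      simp only [List.foldl_cons, List.all_cons, List.isEmpty_cons]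
      by_cases hd : PySem.Chars.isdigit c = true
      · have hm : c ≠ '-' := by
          intro h; subst h; exact absurd hd (by decide)
        have h : pvStepA 1 c = 2 := by
          unfold pvStepA pvTablaEstados
          rw [if_neg (by simpa using hm), if_pos hd]
          rfl
        rw [h, pvFold_from2, hd]
        simp
      · have h : pvStepA 1 c = 3 := by
          unfold pvStepA pvTablaEstados
          split_ifs with h1
          · rfl
          · rfl
        rw [h, pvFold_from3]
        simp [hd]

-- B, rewritten through toList
theorem pvAlt_toList (s : String) :
    validar_numero_entero_alt s =
      (match s.toList with
        | [] => false
        | c :: cs =>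
            if c = '-' then !cs.isEmpty && cs.all PySem.Chars.isdigit
            else PySem.Chars.isdigit c && cs.all PySem.Chars.isdigit) := by
  unfold validar_numero_entero_alt
  by_cases hs : PySem.Str.startswith s "-" = true
  · have hp : ['-'] <+: s.toList := by
      have hiff := PySem.Chars.startswith_iff (s := s.toList) (p := "-".toList)
      simp only [PySem.Str.startswith_eq] at hs
      simpa using hiff.mp hs
    obtain ⟨t, ht⟩ := hp
    rw [hs, if_pos rfl, ← ht]
    have hrest : (PySem.Str.slice s (some 1) none).toList = t := by
      have h1 : (PySem.Str.slice s (some 1) none).toList = s.toList.tail := by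
        simp [PySem.List.slice_from]
      rw [h1, ← ht]
      rfl
    have hlen : PySem.Str.len (PySem.Str.slice s (some 1) none) = t.length := by
      simp [hrest]
    show (decide (0 < PySem.Str.len (PySem.Str.slice s (some 1) none)) &&
      (PySem.Str.slice s (some 1) none).toList.all PySem.Chars.isdigit) = _
    rw [hrest, hlen]
    cases t <;> simp
  · rw [if_neg hs]
    cases h : s.toList with
    | nil => simp [h]
    | cons c cs =>
        have hm : c ≠ '-' := by
          intro hc
          apply hs
          simp only [PySem.Str.startswith_eq]
          rw [PySem.Chars.startswith_iff]
          exact ⟨cs, by simp [h, hc]⟩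
        simp [h, hm]

-- ===== VERDICT (by name: the statement is the Claim_ definition above) =====
theorem validar_numero_entero_spec : Claim_equal_validar_numero_entero := by
  intro s _
  unfold Spec_validar_numero_entero validar_numero_entero
  rw [pvAlt_toList]
  cases h : s.toList with
  | nil => rfl
  | cons c cs =>
      simp only [List.foldl_cons]
      by_cases hm : c = '-'
      · subst hm
        have h0 : pvStepA 0 '-' = 1 := by decide
        rw [h0, pvFold_from1]
        simp
      · by_cases hd : PySem.Chars.isdigit c = true
        · have h0 : pvStepA 0 c = 2 := by
            unfold pvStepA pvTablaEstados
            rw [if_neg (by simpa using hm), if_pos hd]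
            rfl
          rw [h0, pvFold_from2]
          simp [hm, hd]
        · have h0 : pvStepA 0 c = 3 := by
            unfold pvStepA pvTablaEstados
            split_ifs with h1
            · exact absurd (by simpa using h1) hm
            · rfl
          rw [h0, pvFold_from3]
          simp [hm, hd]
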